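-- pv_equiv track=rewrite | github.com/mtalimanchuk/SpellsBot | spells_bot/responder.py | _book_alias_to_readable_name
-- ===== SOURCE A (Python) =====
-- def _book_alias_to_readable_name(book_alias: str) -> str:
--     words = []
--     current_word = ""
--
--     for char in book_alias:
--         if char.isupper():
--             words.append(current_word)
--             current_word = ""
--         current_word += char
--
--     if current_word:
--         words.append(current_word)
--
--     return " ".join(w.capitalize() for w in words)
-- ===== SOURCE B (Python) =====
-- def _book_alias_to_readable_name(book_alias: str) -> str:
--     if not book_alias:
--         return ""
--     cuts = [i for i, c in enumerate(book_alias) if c.isupper()] + [len(book_alias)]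
--     segments = [book_alias[a:b] for a, b in zip([0] + cuts, cuts)]
--     return " ".join(s.capitalize() for s in segments)
-- ===== Notes on version B (the rewrite author's own statement) =====
-- stated objective: alternative
-- what changed: B computes the uppercase boundary indices in one enumerate pass and builds the words by slicing the string between consecutive cut points (zip of shifted cut lists), instead of A's character-by-character accumulation loop with a current-word buffer.
import Mathlib
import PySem

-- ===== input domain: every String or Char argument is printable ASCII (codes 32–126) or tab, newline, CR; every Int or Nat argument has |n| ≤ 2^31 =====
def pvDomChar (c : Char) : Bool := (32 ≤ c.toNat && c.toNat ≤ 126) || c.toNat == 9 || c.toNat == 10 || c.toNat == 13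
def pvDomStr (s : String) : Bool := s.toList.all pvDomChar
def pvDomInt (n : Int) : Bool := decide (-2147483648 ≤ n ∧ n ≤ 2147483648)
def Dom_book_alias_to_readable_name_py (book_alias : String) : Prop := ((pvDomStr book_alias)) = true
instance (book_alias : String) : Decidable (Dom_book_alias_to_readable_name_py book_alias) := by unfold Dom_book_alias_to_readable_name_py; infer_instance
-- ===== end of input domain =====

-- B replaces A's character-accumulation loop by computing the uppercase boundary indices once and
-- slicing the string between consecutive cut points (alternative decomposition, same cost).


-- Python str.capitalize(): first char upper-cased, rest lower-cased (exact on the ASCII domain)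
def pyCapitalize : List Char → List Char
  | [] => []
  | c :: r => PySem.Chars.upperChar c :: PySem.Chars.lower r

-- ===== PORT A =====
-- A's loop state: (words so far, current word); a final append of the non-empty current word.
def book_alias_to_readable_name_py (book_alias : String) : String :=
  let st := book_alias.toList.foldl
    (fun (st : List (List Char) × List Char) (c : Char) =>
      let st := if PySem.Chars.isupper c then (st.1 ++ [st.2], ([] : List Char)) else st
      (st.1, st.2 ++ [c]))
    ([], [])
  let words := if st.2 ≠ [] then st.1 ++ [st.2] else st.1
  String.ofList (PySem.Chars.join [' '] (words.map pyCapitalize))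

-- ===== PORT B =====
-- B: uppercase indices + [len] as cut points, slices between consecutive cut points.
def book_alias_to_readable_name_py_alt (book_alias : String) : String :=
  let cs := book_alias.toList
  if cs = [] then "" else
  let cuts := ((PySem.List.enumerate cs).filter (fun p => PySem.Chars.isupper p.2)).map (·.1)
                ++ [(cs.length : Int)]
  let segments := (((0 : Int) :: cuts).zip cuts).map
                    (fun p => PySem.List.slice cs (some p.1) (some p.2))
  String.ofList (PySem.Chars.join [' '] (segments.map pyCapitalize))

-- ===== PRECONDITION & SPEC =====
def Spec_book_alias_to_readable_name_py (book_alias : String) (out : String) : Prop := out = book_alias_to_readable_name_py_alt book_alias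
instance (book_alias : String) (out : String) : Decidable (Spec_book_alias_to_readable_name_py book_alias out) := by unfold Spec_book_alias_to_readable_name_py; infer_instance

-- ===== CLAIM (what is proved, stated in full; the proofs are below) =====
def Claim_equal_book_alias_to_readable_name_py : Prop := ∀ (book_alias : String), Dom_book_alias_to_readable_name_py book_alias → Spec_book_alias_to_readable_name_py book_alias (book_alias_to_readable_name_py book_alias)

-- ===== LEMMAS AND PROOFS =====

-- Common recursive characterisation of the word list both programs produce.
def wordsOf (cur : List Char) : List Char → List (List Char)
  | [] => if cur ≠ [] then [cur] else []
  | c :: rest =>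
      if PySem.Chars.isupper c then cur :: wordsOf [c] rest else wordsOf (cur ++ [c]) rest

-- A's loop followed by the final append computes wordsOf.
lemma afold (cs : List Char) : ∀ (words : List (List Char)) (cur : List Char),
    (let st := cs.foldl
        (fun (st : List (List Char) × List Char) (c : Char) =>
          let st := if PySem.Chars.isupper c then (st.1 ++ [st.2], ([] : List Char)) else st
          (st.1, st.2 ++ [c]))
        (words, cur)
      if st.2 ≠ [] then st.1 ++ [st.2] else st.1) = words ++ wordsOf cur cs := by
  induction cs with
  | nil => intro words cur; simp [wordsOf]; split_ifs <;> simp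
  | cons c rest ih =>
      intro words cur
      simp only [List.foldl_cons, wordsOf]
      by_cases h : PySem.Chars.isupper c
      · simp only [h, if_true, ih]; simp
      · simp only [h, ih]; simp

-- B's segments, written with an explicit previous cut point.
def segsFrom (full : List Char) (prev : Int) : List Int → List (List Char)
  | [] => []
  | b :: r => PySem.List.slice full (some prev) (some b) :: segsFrom full b r

lemma zip_segs (full : List Char) (l : List Int) : ∀ (prev : Int),
    ((prev :: l).zip l).map (fun p => PySem.List.slice full (some p.1) (some p.2))
      = segsFrom full prev l := by
  induction l with
  | nil => intro prev; simp [segsFrom]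
  | cons b r ih => intro prev; simp [segsFrom, List.zip_cons_cons, ih b]

lemma slice_prefix (p cs : List Char) (prev : Nat) (h : prev ≤ p.length) :
    PySem.List.slice (p ++ cs) (some (prev : Int)) (some (p.length : Int)) = p.drop prev := by
  rw [PySem.List.slice_toNat (p ++ cs) (Int.natCast_nonneg prev) (Int.natCast_nonneg p.length)]
  simp only [Int.toNat_natCast]
  rw [List.drop_append_of_le_length h]
  rw [List.take_append_of_le_length (by simp)]
  exact List.take_of_length_le (by simp)

-- Main invariant: slicing at the uppercase cut points of the suffix yields wordsOf.
lemma segs_eq_wordsOf (cs : List Char) : ∀ (p : List Char) (prev : Nat),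
    prev ≤ p.length → prev < p.length + cs.length →
    segsFrom (p ++ cs) (prev : Int)
        (((PySem.List.enumerate cs (p.length : Int)).filter
            (fun q => PySem.Chars.isupper q.2)).map (·.1) ++ [((p ++ cs).length : Int)])
      = wordsOf (p.drop prev) cs := by
  induction cs with
  | nil =>
      intro p prev h1 h2
      simp only [List.length_nil, Nat.add_zero] at h2
      simp only [PySem.List.enumerate_nil, List.filter_nil, List.map_nil, List.nil_append,
        segsFrom, List.append_nil, wordsOf]
      have hs := slice_prefix p [] prev h1
      rw [List.append_nil] at hs
      rw [hs]
      have hne : p.drop prev ≠ [] := by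
        intro hc
        have := congrArg List.length hc
        simp at this; omega
      simp [hne]
  | cons c rest ih =>
      intro p prev h1 h2
      rw [PySem.List.enumerate_cons, List.filter_cons]
      have happ : p ++ c :: rest = (p ++ [c]) ++ rest := by simp
      have hcast : ((p.length : Int) + 1) = (((p ++ [c]).length : Int)) := by
        simp only [List.length_append, List.length_cons, List.length_nil]; push_cast; ring
      by_cases h : PySem.Chars.isupper c
      · rw [if_pos (by simpa using h)]
        simp only [List.map_cons, List.cons_append, segsFrom]
        rw [slice_prefix p (c :: rest) prev h1]
        rw [happ, hcast]
        rw [ih (p ++ [c]) p.length (by simp)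
              (by simp only [List.length_append, List.length_cons, List.length_nil]; omega)]
        rw [List.drop_left]
        simp [wordsOf, h]
      · rw [if_neg (by simpa using h)]
        simp only [wordsOf, h, Bool.false_eq_true, if_false]
        rw [happ, hcast]
        rw [ih (p ++ [c]) prev
              (by simp only [List.length_append, List.length_cons, List.length_nil]; omega)
              (by simp only [List.length_append, List.length_cons, List.length_nil,
                    List.length_cons] at h2 ⊢; omega)]
        rw [List.drop_append_of_le_length h1]

-- ===== VERDICT (by name: the statement is the Claim_ definition above) =====
theorem book_alias_to_readable_name_py_spec : Claim_equal_book_alias_to_readable_name_py := by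
  intro s _
  unfold Spec_book_alias_to_readable_name_py
  unfold book_alias_to_readable_name_py book_alias_to_readable_name_py_alt
  by_cases hnil : s.toList = []
  · simp only [hnil, if_true, List.foldl_nil]
    norm_num
  · simp only [hnil, if_false]
    rw [afold s.toList [] []]
    rw [zip_segs]
    have := segs_eq_wordsOf s.toList [] 0 (by simp)
      (by simp; exact List.length_pos_iff.mpr hnil)
    simp only [List.nil_append, List.drop_nil, Nat.cast_zero, List.length_nil] at this
    rw [this]
    simp
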